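-- pv_equiv track=rewrite | github.com/czytobiegaczka/kurs_ALX | dzien4/zadania/zliczanie_znaków.py | zlicz_znaki
-- ===== SOURCE A (Python) =====
-- def zlicz_znaki(tekst, poczatek = '<', koniec = '>'):
--     ile_znakow = 0
--     poziom = 0
--     for znak in tekst:
--         if znak == poczatek:
--             poziom += 1
--         elif znak == koniec:
--             poziom -= 1
--         else:
--             ile_znakow += poziom
--     return ile_znakow
-- ===== SOURCE B (Python) =====
-- def zlicz_znaki(tekst, poczatek = '<', koniec = '>'):
--     pozostale = sum(1 for z in tekst if z != poczatek and z != koniec)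
--     wynik = 0
--     for znak in tekst:
--         if znak == poczatek:
--             wynik += pozostale
--         elif znak == koniec:
--             wynik -= pozostale
--         else:
--             pozostale -= 1
--     return wynik
-- ===== Notes on version B (the rewrite author's own statement) =====
-- stated objective: alternative
-- what changed: Instead of tracking the running nesting level and adding it at every non-bracket character, B precomputes the number of non-bracket characters and attributes each character's contribution to the brackets enclosing it (add/subtract the count of non-bracket characters still ahead at each bracket).
import Mathlib
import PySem

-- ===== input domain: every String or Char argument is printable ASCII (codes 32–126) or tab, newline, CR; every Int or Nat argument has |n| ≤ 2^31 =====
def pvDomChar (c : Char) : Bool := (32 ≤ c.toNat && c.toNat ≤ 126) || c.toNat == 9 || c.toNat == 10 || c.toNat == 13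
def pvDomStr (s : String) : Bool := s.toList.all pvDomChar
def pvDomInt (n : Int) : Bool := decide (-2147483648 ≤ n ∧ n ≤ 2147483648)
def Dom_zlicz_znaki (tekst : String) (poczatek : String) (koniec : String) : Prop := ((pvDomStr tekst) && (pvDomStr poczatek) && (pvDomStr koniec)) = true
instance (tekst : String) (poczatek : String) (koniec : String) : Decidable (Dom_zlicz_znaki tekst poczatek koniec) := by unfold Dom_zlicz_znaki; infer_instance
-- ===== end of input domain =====

-- B replaces A's running nesting level by a precomputed count of non-bracket
-- characters still ahead, added/subtracted at each bracket (objective: alternative).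

-- ===== PORT A =====
-- the for-loop of A: state (ile_znakow, poziom)
def zliczA_go (poczatek koniec : String) : List Char → Int → Int → Int
  | [], ile, _ => ile
  | znak :: t, ile, poziom =>
    if String.singleton znak = poczatek then zliczA_go poczatek koniec t ile (poziom + 1)
    else if String.singleton znak = koniec then zliczA_go poczatek koniec t ile (poziom - 1)
    else zliczA_go poczatek koniec t (ile + poziom) poziom

def zlicz_znaki (tekst : String) (poczatek : String) (koniec : String) : Int :=
  zliczA_go poczatek koniec tekst.toList 0 0

-- ===== PORT B =====
-- pozostale = sum(1 for z in tekst if z != poczatek and z != koniec)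
def zliczB_cnt (poczatek koniec : String) : List Char → Int
  | [] => 0
  | z :: t =>
    (if String.singleton z ≠ poczatek ∧ String.singleton z ≠ koniec then 1 else 0)
      + zliczB_cnt poczatek koniec t

-- the for-loop of B: state (wynik, pozostale)
def zliczB_go (poczatek koniec : String) : List Char → Int → Int → Int
  | [], wynik, _ => wynik
  | znak :: t, wynik, pozostale =>
    if String.singleton znak = poczatek then zliczB_go poczatek koniec t (wynik + pozostale) pozostale
    else if String.singleton znak = koniec then zliczB_go poczatek koniec t (wynik - pozostale) pozostale
    else zliczB_go poczatek koniec t wynik (pozostale - 1)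

def zlicz_znaki_alt (tekst : String) (poczatek : String) (koniec : String) : Int :=
  zliczB_go poczatek koniec tekst.toList 0 (zliczB_cnt poczatek koniec tekst.toList)

-- ===== PRECONDITION & SPEC =====
def Spec_zlicz_znaki (tekst : String) (poczatek : String) (koniec : String) (out : Int) : Prop := out = zlicz_znaki_alt tekst poczatek koniec
instance (tekst : String) (poczatek : String) (koniec : String) (out : Int) : Decidable (Spec_zlicz_znaki tekst poczatek koniec out) := by unfold Spec_zlicz_znaki; infer_instance

-- ===== CLAIM (what is proved, stated in full; the proofs are below) =====
def Claim_equal_zlicz_znaki : Prop := ∀ (tekst : String) (poczatek : String) (koniec : String), Dom_zlicz_znaki tekst poczatek koniec → Spec_zlicz_znaki tekst poczatek koniec (zlicz_znaki tekst poczatek koniec)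

-- ===== LEMMAS AND PROOFS =====

-- B's loop is affine in its accumulator
theorem zliczB_go_shift (poczatek koniec : String) (l : List Char) :
    ∀ (w r : Int), zliczB_go poczatek koniec l w r = w + zliczB_go poczatek koniec l 0 r := by
  induction l with
  | nil => intro w r; simp [zliczB_go]
  | cons z t ih =>
    intro w r
    simp only [zliczB_go]
    split_ifs with h1 h2
    · rw [ih (w + r), ih (0 + r)]; ring
    · rw [ih (w - r), ih (0 - r)]; ring
    · rw [ih w]

-- main invariant connecting A's level-based loop to B's remaining-ahead loop
theorem zlicz_main (poczatek koniec : String) (l : List Char) :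
    ∀ (ile poziom : Int),
      zliczA_go poczatek koniec l ile poziom
        = ile + poziom * zliczB_cnt poczatek koniec l
            + zliczB_go poczatek koniec l 0 (zliczB_cnt poczatek koniec l) := by
  induction l with
  | nil => intro ile poziom; simp [zliczA_go, zliczB_go, zliczB_cnt]
  | cons z t ih =>
    intro ile poziom
    by_cases h1 : String.singleton z = poczatek
    · have hc : ¬(String.singleton z ≠ poczatek ∧ String.singleton z ≠ koniec) := by tauto
      simp only [zliczA_go, zliczB_go, zliczB_cnt, if_pos h1, if_neg hc]
      rw [ih ile (poziom + 1)]
      simp only [zero_add, add_zero, zero_sub, sub_zero]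
      linarith [zliczB_go_shift poczatek koniec t (zliczB_cnt poczatek koniec t) (zliczB_cnt poczatek koniec t)]
    · by_cases h2 : String.singleton z = koniec
      · have hc : ¬(String.singleton z ≠ poczatek ∧ String.singleton z ≠ koniec) := by tauto
        simp only [zliczA_go, zliczB_go, zliczB_cnt, if_neg h1, if_pos h2, if_neg hc]
        rw [ih ile (poziom - 1)]
        simp only [zero_add, add_zero, zero_sub, sub_zero]
        linarith [zliczB_go_shift poczatek koniec t (-zliczB_cnt poczatek koniec t) (zliczB_cnt poczatek koniec t)]
      · have hc : String.singleton z ≠ poczatek ∧ String.singleton z ≠ koniec := ⟨h1, h2⟩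
        simp only [zliczA_go, zliczB_go, zliczB_cnt, if_neg h1, if_neg h2, if_pos hc]
        rw [ih (ile + poziom) poziom]
        have : (1 : Int) + zliczB_cnt poczatek koniec t - 1 = zliczB_cnt poczatek koniec t := by ring
        rw [this]
        ring

-- ===== VERDICT (by name: the statement is the Claim_ definition above) =====
theorem zlicz_znaki_spec : Claim_equal_zlicz_znaki := by
  intro tekst poczatek koniec _
  unfold Spec_zlicz_znaki zlicz_znaki zlicz_znaki_alt
  rw [zlicz_main]
  ring
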